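-- pv_equiv track=rewrite | github.com/ruijun1110/Influencer-Scout-Agent | backend/app/services/enrich.py | filter_emails
-- ===== SOURCE A (Python) =====
-- GENERIC_PREFIXES = {
--     "noreply",
--     "no-reply",
--     "support",
--     "info",
--     "hello",
--     "help",
--     "admin",
--     "webmaster",
--     "postmaster",
--     "mailer-daemon",
--     "abuse",
--     "contact",
--     "sales",
--     "billing",
--     "privacy",
--     "security",
-- }
--
-- def filter_emails(emails: list[str]) -> list[str]:
--     """Remove generic/service addresses and deduplicate (matches CLI skill)."""
--     seen: set[str] = set()
--     filtered: list[str] = []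
--     for email in emails:
--         email = email.lower().strip()
--         if email in seen:
--             continue
--         prefix = email.split("@", 1)[0]
--         if prefix in GENERIC_PREFIXES:
--             continue
--         if email.endswith((".png", ".jpg", ".gif", ".svg", ".webp")):
--             continue
--         seen.add(email)
--         filtered.append(email)
--     return filtered
-- ===== SOURCE B (Python) =====
-- GENERIC_PREFIXES = {
--     "noreply",
--     "no-reply",
--     "support",
--     "info",
--     "hello",
--     "help",
--     "admin",
--     "webmaster",
--     "postmaster",
--     "mailer-daemon",
--     "abuse",
--     "contact",
--     "sales",
--     "billing",
--     "privacy",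
--     "security",
-- }
--
-- IMAGE_SUFFIXES = (".png", ".jpg", ".gif", ".svg", ".webp")
--
--
-- def _is_excluded(email: str) -> bool:
--     prefix = email.split("@", 1)[0]
--     return prefix in GENERIC_PREFIXES or email.endswith(IMAGE_SUFFIXES)
--
--
-- def filter_emails(emails: list[str]) -> list[str]:
--     """Worklist algorithm: no seen-set. Normalize everything first, then
--     repeatedly take the head of the remaining worklist, delete every later
--     occurrence of it from the worklist, and keep it unless excluded.
--     Correct because deleting later duplicates of an excluded head is harmless:
--     those duplicates would be excluded anyway."""
--     work = [e.lower().strip() for e in emails]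
--     out = []
--     while work:
--         head = work[0]
--         rest = [x for x in work[1:] if x != head]
--         if not _is_excluded(head):
--             out.append(head)
--         work = rest
--     return out
-- ===== Notes on version B (the rewrite author's own statement) =====
-- stated objective: alternative
-- what changed: Replaces A's single pass with a seen-set gate by a seen-set-free worklist algorithm: normalize all emails first, then repeatedly pop the head of the worklist, delete all later occurrences of it from the worklist, and keep the head unless it is generic/image; deleting duplicates of an excluded head is safe because those duplicates would be excluded anyway.
import Mathlib
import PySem

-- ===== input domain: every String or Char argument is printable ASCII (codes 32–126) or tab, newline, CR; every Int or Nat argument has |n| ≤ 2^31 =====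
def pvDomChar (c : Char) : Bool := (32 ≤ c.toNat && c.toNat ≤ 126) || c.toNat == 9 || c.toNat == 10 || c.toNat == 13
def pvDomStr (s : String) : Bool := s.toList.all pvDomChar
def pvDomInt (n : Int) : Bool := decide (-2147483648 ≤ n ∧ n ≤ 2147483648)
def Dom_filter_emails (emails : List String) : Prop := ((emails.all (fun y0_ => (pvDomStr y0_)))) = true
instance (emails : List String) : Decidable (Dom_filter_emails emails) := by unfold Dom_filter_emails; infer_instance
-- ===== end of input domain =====

-- B replaces A's seen-set single pass by a seen-set-free worklist loop (normalize all, then repeatedly pop the head and delete its later duplicates from the worklist); alternative decomposition, not faster; equivalence proved on all inputs.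

-- shared module constant (Python's GENERIC_PREFIXES set; used for membership only)
def pvGenericPrefixes : PySem.Set String :=
  PySem.Set.ofList ["noreply", "no-reply", "support", "info", "hello", "help", "admin",
    "webmaster", "postmaster", "mailer-daemon", "abuse", "contact", "sales", "billing",
    "privacy", "security"]

-- ===== PORT A =====
-- A's loop: seen-set gate, prefix filter, image-suffix filter, append — all interleaved.
def pvLoopA (seen : PySem.Set String) (filtered : List String) : List String → List String
  | [] => filtered
  | e :: rest =>
    let email := PySem.Str.strip (PySem.Str.lower e)
    if PySem.Set.contains seen email then pvLoopA seen filtered rest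
    else
      let pfx := ((PySem.Str.splitMax? email "@" 1).getD []).headD ""
      if PySem.Set.contains pvGenericPrefixes pfx then pvLoopA seen filtered rest
      else if [".png", ".jpg", ".gif", ".svg", ".webp"].any
          (fun suf => PySem.Str.endswith email suf) then pvLoopA seen filtered rest
      else pvLoopA (PySem.Set.add seen email) (filtered ++ [email]) rest

def filter_emails (emails : List String) : List String :=
  pvLoopA PySem.Set.empty [] emails

-- ===== PORT B =====
def pvImageSuffixes : List String := [".png", ".jpg", ".gif", ".svg", ".webp"]

def pvNorm (e : String) : String := PySem.Str.strip (PySem.Str.lower e)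

def pvIsExcluded (email : String) : Bool :=
  let pfx := ((PySem.Str.splitMax? email "@" 1).getD []).headD ""
  PySem.Set.contains pvGenericPrefixes pfx
    || pvImageSuffixes.any (fun suf => PySem.Str.endswith email suf)

-- helper of the while loop: delete every occurrence of the head from the rest
def pvRemove (h : String) (t : List String) : List String := t.filter (fun x => x != h)

theorem pvRemove_length_le (h : String) (t : List String) : (pvRemove h t).length ≤ t.length :=
  List.length_filter_le _ _

-- the while loop of B: pop the head, delete its later occurrences, keep it unless excluded
def pvLoopB (work out : List String) : List String :=
  match work with
  | [] => out
  | h :: t =>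
    if pvIsExcluded h then pvLoopB (pvRemove h t) out
    else pvLoopB (pvRemove h t) (out ++ [h])
termination_by work.length
decreasing_by
  · exact Nat.lt_succ_of_le (pvRemove_length_le _ _)
  · exact Nat.lt_succ_of_le (pvRemove_length_le _ _)

def filter_emails_alt (emails : List String) : List String :=
  pvLoopB (emails.map pvNorm) []

-- ===== PRECONDITION & SPEC =====
def Spec_filter_emails (emails : List String) (out : List String) : Prop := out = filter_emails_alt emails
instance (emails : List String) (out : List String) : Decidable (Spec_filter_emails emails out) := by unfold Spec_filter_emails; infer_instance

-- ===== CLAIM (what is proved, stated in full; the proofs are below) =====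
def Claim_equal_filter_emails : Prop := ∀ (emails : List String), Dom_filter_emails emails → Spec_filter_emails emails (filter_emails emails)

-- ===== LEMMAS AND PROOFS =====

-- one step of A's loop, phrased with B's helpers
theorem pvLoopA_cons (sA : PySem.Set String) (acc : List String) (e : String)
    (rest : List String) :
    pvLoopA sA acc (e :: rest) =
      if PySem.Set.contains sA (pvNorm e) then pvLoopA sA acc rest
      else if pvIsExcluded (pvNorm e) then pvLoopA sA acc rest
      else pvLoopA (PySem.Set.add sA (pvNorm e)) (acc ++ [pvNorm e]) rest := by
  simp only [pvLoopA, pvIsExcluded, pvNorm, pvImageSuffixes]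
  by_cases h1 : PySem.Set.contains sA (PySem.Str.strip (PySem.Str.lower e)) = true
  · rw [if_pos h1, if_pos h1]
  · rw [if_neg h1, if_neg h1]
    by_cases h2 : PySem.Set.contains pvGenericPrefixes
        (((PySem.Str.splitMax? (PySem.Str.strip (PySem.Str.lower e)) "@" 1).getD []).headD "")
        = true
    · rw [if_pos h2, if_pos (by simp only [Bool.or_eq_true]; exact Or.inl h2)]
    · rw [if_neg h2]
      by_cases h3 : ([".png", ".jpg", ".gif", ".svg", ".webp"].any
          (fun suf => PySem.Str.endswith (PySem.Str.strip (PySem.Str.lower e)) suf)) = true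
      · rw [if_pos h3, if_pos (by simp only [Bool.or_eq_true]; exact Or.inr h3)]
      · rw [if_neg h3, if_neg (by simp only [Bool.or_eq_true]; exact not_or.2 ⟨h2, h3⟩)]

-- unfolding of pvLoopB on a cons
theorem pvLoopB_cons (h : String) (t out : List String) :
    pvLoopB (h :: t) out =
      if pvIsExcluded h then pvLoopB (pvRemove h t) out
      else pvLoopB (pvRemove h t) (out ++ [h]) := by
  rw [pvLoopB]

-- deleting every occurrence of an EXCLUDED value from the worklist changes nothing:
-- B drops each such occurrence anyway when it reaches the head.
theorem pvLoopB_filter_excluded (x : String) (hx : pvIsExcluded x = true) :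
    ∀ (n : Nat) (l : List String), l.length ≤ n →
      ∀ out, pvLoopB (pvRemove x l) out = pvLoopB l out := by
  intro n
  induction n with
  | zero =>
    intro l hl out
    have : l = [] := List.eq_nil_of_length_eq_zero (Nat.le_zero.1 hl)
    subst this; rfl
  | succ n ih =>
    intro l hl out
    cases l with
    | nil => rfl
    | cons h t =>
      by_cases hh : h = x
      · subst hh
        have h0 : pvRemove h (h :: t) = pvRemove h t := by simp [pvRemove]
        rw [h0, pvLoopB_cons, if_pos hx]
      · have h0 : pvRemove x (h :: t) = h :: pvRemove x t := by simp [pvRemove, hh]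
        rw [h0, pvLoopB_cons, pvLoopB_cons]
        have hcomm : pvRemove h (pvRemove x t) = pvRemove x (pvRemove h t) := by
          simp only [pvRemove, List.filter_filter]
          exact List.filter_congr (fun a _ => by simp [Bool.and_comm])
        have hlen : (pvRemove h t).length ≤ n :=
          le_trans (pvRemove_length_le _ _) (Nat.succ_le_succ_iff.1 hl)
        by_cases he : pvIsExcluded h = true
        · rw [if_pos he, if_pos he, hcomm, ih _ hlen out]
        · rw [if_neg he, if_neg he, hcomm, ih _ hlen (out ++ [h])]

-- main invariant: A's loop from seen-state sA equals B's worklist loop on the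
-- normalized tail with the already-seen values deleted.
theorem pvKey (es : List String) : ∀ (sA acc : List String),
    pvLoopA sA acc es =
      pvLoopB ((es.map pvNorm).filter (fun y => !PySem.Set.contains sA y)) acc := by
  induction es with
  | nil => intro sA acc; simp [pvLoopA, pvLoopB]
  | cons e rest ih =>
    intro sA acc
    rw [pvLoopA_cons, List.map_cons]
    by_cases h1 : PySem.Set.contains sA (pvNorm e) = true
    · rw [if_pos h1]
      have hm : pvNorm e ∈ sA := by simpa [PySem.Set.contains] using h1
      have h0 : (pvNorm e :: rest.map pvNorm).filter (fun y => !PySem.Set.contains sA y)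
          = (rest.map pvNorm).filter (fun y => !PySem.Set.contains sA y) := by
        simp [PySem.Set.contains, hm]
      rw [h0, ih]
    · have h1' : PySem.Set.contains sA (pvNorm e) = false := by
        cases h : PySem.Set.contains sA (pvNorm e) with
        | false => rfl
        | true => exact absurd h h1
      have hm' : pvNorm e ∉ sA := by
        intro hm; exact h1 (by simpa [PySem.Set.contains] using hm)
      have hfc : (pvNorm e :: rest.map pvNorm).filter (fun y => !PySem.Set.contains sA y)
          = pvNorm e :: (rest.map pvNorm).filter (fun y => !PySem.Set.contains sA y) := by
        simp [PySem.Set.contains, hm']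
      rw [if_neg h1, hfc, pvLoopB_cons]
      by_cases h2 : pvIsExcluded (pvNorm e) = true
      · rw [if_pos h2, if_pos h2, ih,
          pvLoopB_filter_excluded (pvNorm e) h2 _ _ (le_refl _)]
      · rw [if_neg h2, if_neg h2, ih]
        have harg : pvRemove (pvNorm e)
              ((rest.map pvNorm).filter (fun y => !PySem.Set.contains sA y))
            = (rest.map pvNorm).filter
                (fun y => !PySem.Set.contains (PySem.Set.add sA (pvNorm e)) y) := by
          simp only [pvRemove, List.filter_filter]
          refine List.filter_congr (fun a _ => ?_)
          by_cases hm : a ∈ sA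
          · simp [PySem.Set.add, PySem.Set.contains, hm', hm]
          · by_cases ha : a = pvNorm e
            · subst ha
              simp [PySem.Set.add, PySem.Set.contains, hm']
            · simp [PySem.Set.add, PySem.Set.contains, hm', hm, ha]
        rw [harg]

-- ===== VERDICT (by name: the statement is the Claim_ definition above) =====
theorem filter_emails_spec : Claim_equal_filter_emails := by
  intro emails _
  unfold Spec_filter_emails filter_emails filter_emails_alt
  rw [pvKey]
  congr 1
  simp [PySem.Set.empty, PySem.Set.contains]
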